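-- pv_equiv track=rewrite | github.com/jlgleason/hts-constrained-embeddings | src/data.py | make_hierarchy_level_dict
-- ===== SOURCE A (Python) =====
-- from typing import Tuple, List, Dict, Iterable
--
-- TRAVEL_TYPES = 4
--
-- LEVEL_NAMES = [
--     'country',
--     'state',
--     'zone',
--     'region',
--     'country-by-travel',
--     'state-by-travel',
--     'zone-by-travel',
--     'region-by-travel'
-- ]
--
-- def make_hierarchy_level_dict(
--     level_counts: List[List[int]]
-- ) -> Dict[str, List[int]]:
--     """ creates dict of which columns (series) belong to which level of hierarchy
--
--     Arguments:
--         level_counts {List[List[int]]} -- list of the counts of leaves that sum to each node,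
--             one list for each level in the hierarchy
--
--     Returns:
--         Dict[str, [List[int]]] -- mapping from hierachy level to columns in that level of hierarchy
--     """
--
--     def idx_func(idx_list):
--         return [i for i in range(len(idx_list))]
--
--     level_agg = level_counts[0] + level_counts[1] + [sum(level_counts[2])] + [sum(level_counts[3])]
--     level_agg += [l * TRAVEL_TYPES for l in level_agg]
--
--     return {
--         level: [idx for idx in range(sum(level_agg[:i]), sum(level_agg[:i+1]))]
--         for i, level in enumerate(LEVEL_NAMES)
--     }
-- ===== SOURCE B (Python) =====
-- TRAVEL_TYPES = 4
--
-- LEVEL_NAMES = [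
--     'country',
--     'state',
--     'zone',
--     'region',
--     'country-by-travel',
--     'state-by-travel',
--     'zone-by-travel',
--     'region-by-travel'
-- ]
--
-- def make_hierarchy_level_dict(level_counts):
--     head = level_counts[0] + level_counts[1] + [sum(level_counts[2])] + [sum(level_counts[3])]
--     level_agg = head + [TRAVEL_TYPES * l for l in head]
--     result = {}
--     start = 0
--     for i, level in enumerate(LEVEL_NAMES):
--         count = level_agg[i] if i < len(level_agg) else 0
--         end = start + count
--         result[level] = list(range(start, end))
--         start = end
--     return result
-- ===== Notes on version B (the rewrite author's own statement) =====
-- stated objective: simpler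
-- what changed: Replaces the dict comprehension that recomputes sum(level_agg[:i]) and sum(level_agg[:i+1]) for each of the 8 levels by a single pass that accumulates a running offset and emits range(start, start+count) per level.
import Mathlib
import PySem

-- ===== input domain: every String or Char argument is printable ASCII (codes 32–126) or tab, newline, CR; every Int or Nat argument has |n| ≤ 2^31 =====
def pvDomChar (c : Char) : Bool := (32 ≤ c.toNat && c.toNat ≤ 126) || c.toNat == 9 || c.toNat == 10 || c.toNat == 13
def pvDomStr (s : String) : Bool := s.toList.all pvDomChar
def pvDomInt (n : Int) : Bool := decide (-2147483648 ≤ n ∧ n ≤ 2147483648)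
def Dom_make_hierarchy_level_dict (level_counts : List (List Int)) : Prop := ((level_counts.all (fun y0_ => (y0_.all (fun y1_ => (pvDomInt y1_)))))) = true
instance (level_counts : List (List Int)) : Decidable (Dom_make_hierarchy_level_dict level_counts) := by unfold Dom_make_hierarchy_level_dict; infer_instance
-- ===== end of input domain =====

-- B replaces the dict comprehension's two prefix-sum recomputations per level by a single
-- running offset accumulated in one pass (objective: simpler/alternative decomposition).

-- ===== PORT A =====
def pvLevelNamesA : List String :=
  ["country", "state", "zone", "region",
   "country-by-travel", "state-by-travel", "zone-by-travel", "region-by-travel"]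

-- level_agg = lc[0] + lc[1] + [sum(lc[2])] + [sum(lc[3])]; level_agg += [l * 4 for l in level_agg]
def pvLevelAggA (l0 l1 l2 l3 : List Int) : List Int :=
  let la0 := l0 ++ l1 ++ [l2.sum] ++ [l3.sum]
  la0 ++ la0.map (fun l => l * 4)

def make_hierarchy_level_dict (level_counts : List (List Int)) : List (String × List Int) :=
  match PySem.List.pyGet? level_counts 0, PySem.List.pyGet? level_counts 1,
        PySem.List.pyGet? level_counts 2, PySem.List.pyGet? level_counts 3 with
  | some l0, some l1, some l2, some l3 =>
      let la := pvLevelAggA l0 l1 l2 l3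
      -- dict comprehension over enumerate(LEVEL_NAMES): insert range(sum(la[:i]), sum(la[:i+1]))
      ((PySem.List.enumerate pvLevelNamesA 0).foldl
        (fun d p => PySem.Dict.insert d p.2
          (PySem.List.pyRange ((PySem.List.slice la none (some p.1)).sum)
                              ((PySem.List.slice la none (some (p.1 + 1))).sum) 1))
        (PySem.Dict.mk [])).items
  | _, _, _, _ => []   -- Python raises IndexError here (excluded by Pre_)

-- ===== PORT B =====
-- head = lc[0] + lc[1] + [sum(lc[2])] + [sum(lc[3])]; level_agg = head + [4 * l for l in head]
def pvLevelAggB (l0 l1 l2 l3 : List Int) : List Int :=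
  let head := l0 ++ l1 ++ [l2.sum] ++ [l3.sum]
  head ++ head.map (fun l => 4 * l)

def pvLevelNamesB : List String :=
  ["country", "state", "zone", "region",
   "country-by-travel", "state-by-travel", "zone-by-travel", "region-by-travel"]

def make_hierarchy_level_dict_alt (level_counts : List (List Int)) : List (String × List Int) :=
  -- the four indexings lc[0]..lc[3]; none = IndexError (excluded by Pre_, .getD [] unreachable there)
  ((PySem.List.pyGet? level_counts 0).bind fun l0 =>
   (PySem.List.pyGet? level_counts 1).bind fun l1 =>
   (PySem.List.pyGet? level_counts 2).bind fun l2 =>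
   (PySem.List.pyGet? level_counts 3).map fun l3 =>
      let la := pvLevelAggB l0 l1 l2 l3
      -- running-offset loop: start = 0; for i, level in enumerate(LEVEL_NAMES): …
      ((PySem.List.enumerate pvLevelNamesB 0).foldl
        (fun st p =>
          let count := if p.1 < (la.length : Int) then PySem.List.pyGetD la p.1 0 else 0
          (st.1 + count,
           PySem.Dict.insert st.2 p.2 (PySem.List.pyRange st.1 (st.1 + count) 1)))
        ((0 : Int), PySem.Dict.mk [])).2.items).getD []

-- ===== PRECONDITION & SPEC =====
-- Python A indexes level_counts[0]..[3] and raises IndexError on shorter input.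
def Pre_make_hierarchy_level_dict (level_counts : List (List Int)) : Prop :=
  4 ≤ level_counts.length
instance (level_counts : List (List Int)) : Decidable (Pre_make_hierarchy_level_dict level_counts) := by
  unfold Pre_make_hierarchy_level_dict; infer_instance

def pvWitness_make_hierarchy_level_dict : List (List Int) := [[1, 2], [3], [1, 1], [2]]

def Spec_make_hierarchy_level_dict (level_counts : List (List Int)) (out : List (String × List Int)) : Prop := out = make_hierarchy_level_dict_alt level_counts
instance (level_counts : List (List Int)) (out : List (String × List Int)) : Decidable (Spec_make_hierarchy_level_dict level_counts out) := by unfold Spec_make_hierarchy_level_dict; infer_instance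

-- ===== CLAIM (what is proved, stated in full; the proofs are below) =====
def Claim_equal_make_hierarchy_level_dict : Prop := ∀ (level_counts : List (List Int)), Dom_make_hierarchy_level_dict level_counts → Pre_make_hierarchy_level_dict level_counts → Spec_make_hierarchy_level_dict level_counts (make_hierarchy_level_dict level_counts)

-- ===== LEMMAS AND PROOFS =====

lemma pv_slice_sum_nat (la : List Int) (n : Nat) :
    (PySem.List.slice la none (some (n : Int))).sum = (la.take n).sum := by
  rw [PySem.List.slice_to la (Int.natCast_nonneg n)]
  simp

lemma pv_take_sum_succ (la : List Int) (n : Nat) :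
    (la.take (n + 1)).sum
      = (la.take n).sum + (if (n : Int) < (la.length : Int) then PySem.List.pyGetD la (n : Int) 0 else 0) := by
  rw [PySem.List.pyGetD_natCast]
  simp only [Nat.cast_lt]
  rw [List.take_add_one, List.sum_append]
  by_cases h : n < la.length
  · simp [h, List.getD]
  · simp [h]

lemma pv_fold_eq (la : List Int) (names : List String) :
    ∀ (n : Nat) (d : PySem.Dict String (List Int)),
    (PySem.List.enumerate names (n : Int)).foldl
        (fun d p => PySem.Dict.insert d p.2
          (PySem.List.pyRange ((PySem.List.slice la none (some p.1)).sum)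
                              ((PySem.List.slice la none (some (p.1 + 1))).sum) 1)) d
      = ((PySem.List.enumerate names (n : Int)).foldl
          (fun st p =>
            let count := if p.1 < (la.length : Int) then PySem.List.pyGetD la p.1 0 else 0
            (st.1 + count,
             PySem.Dict.insert st.2 p.2 (PySem.List.pyRange st.1 (st.1 + count) 1)))
          ((la.take n).sum, d)).2 := by
  induction names with
  | nil => intro n d; simp [PySem.List.enumerate_nil]
  | cons x xs ih =>
      intro n d
      rw [PySem.List.enumerate_cons, List.foldl_cons, List.foldl_cons]
      have hcast : (n : Int) + 1 = ((n + 1 : Nat) : Int) := by push_cast; ring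
      have hsum : (la.take n).sum + (if (n : Int) < (la.length : Int) then PySem.List.pyGetD la (n : Int) 0 else 0)
          = (la.take (n + 1)).sum := (pv_take_sum_succ la n).symm
      simp only [hcast, pv_slice_sum_nat la n]
      rw [show (((n + 1 : Nat) : Int) : Int) = ((n + 1 : Nat) : Int) from rfl]
      have := ih (n + 1)
      simp only [pv_slice_sum_nat la (n + 1)] at this ⊢
      rw [hsum]
      exact this _

theorem make_hierarchy_level_dict_spec : Claim_equal_make_hierarchy_level_dict := by
  unfold Claim_equal_make_hierarchy_level_dict
  intro lc _ hpre
  unfold Spec_make_hierarchy_level_dict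
  rcases lc with _ | ⟨l0, _ | ⟨l1, _ | ⟨l2, _ | ⟨l3, rest⟩⟩⟩⟩ <;>
    simp [Pre_make_hierarchy_level_dict] at hpre
  have hget0 : PySem.List.pyGet? (l0 :: l1 :: l2 :: l3 :: rest) 0 = some l0 := by
    rw [show (0 : Int) = ((0 : Nat) : Int) from rfl, PySem.List.pyGet?_natCast]; rfl
  have hget1 : PySem.List.pyGet? (l0 :: l1 :: l2 :: l3 :: rest) 1 = some l1 := by
    rw [show (1 : Int) = ((1 : Nat) : Int) from rfl, PySem.List.pyGet?_natCast]; rfl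
  have hget2 : PySem.List.pyGet? (l0 :: l1 :: l2 :: l3 :: rest) 2 = some l2 := by
    rw [show (2 : Int) = ((2 : Nat) : Int) from rfl, PySem.List.pyGet?_natCast]; rfl
  have hget3 : PySem.List.pyGet? (l0 :: l1 :: l2 :: l3 :: rest) 3 = some l3 := by
    rw [show (3 : Int) = ((3 : Nat) : Int) from rfl, PySem.List.pyGet?_natCast]; rfl
  have hagg : pvLevelAggA l0 l1 l2 l3 = pvLevelAggB l0 l1 l2 l3 := by
    simp [pvLevelAggA, pvLevelAggB, Int.mul_comm]
  simp only [make_hierarchy_level_dict, make_hierarchy_level_dict_alt,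
    hget0, hget1, hget2, hget3, hagg, show pvLevelNamesA = pvLevelNamesB from rfl,
    Option.bind_some, Option.map_some, Option.getD_some]
  have h := pv_fold_eq (pvLevelAggB l0 l1 l2 l3) pvLevelNamesB 0 (PySem.Dict.mk [])
  simp only [Nat.cast_zero, List.take_zero, List.sum_nil] at h
  rw [h]
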